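-- pv_equiv track=rewrite | github.com/chdickey/AOC2024 | day_12.py | calculate_plants_groups
-- ===== SOURCE A (Python) =====
-- def calculate_plants_groups(plants):
--     plants_groups = {}
--     for plant, regions in plants.items():
--         perimeters = []
--         groups = []
--         for region in regions:
--             perimeter = 4
--             group = {(region[0], region[1])}
--             for region2 in regions:
--                 if region[0] == region2[0] and abs(region[1] - region2[1]) == 1 or \
--                     region[1] == region2[1] and abs(region[0] - region2[0]) == 1:
--                     perimeter -= 1
--                     group.add((region2[0], region2[1]))
--             perimeters.append(perimeter)
--             groups.append(group)
--         plants_groups[plant] = (perimeters, groups)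
--     for plant_groups in plants_groups.values():
--         i = 0
--         while i < len(plant_groups[1]):
--             j = i + 1
--             while j < len(plant_groups[1]):
--                 if not plant_groups[1][i].isdisjoint(plant_groups[1][j]):
--                     plant_groups[0][i]  += plant_groups[0][j]
--                     plant_groups[1][i] |= plant_groups[1][j]
--                     del plant_groups[0][j]
--                     del plant_groups[1][j]
--                     j = i + 1
--                 else:
--                     j += 1
--             i += 1
--     return plants_groups
-- ===== SOURCE B (Python) =====
-- def _neighbors(d):
--     return [(d[0] - 1, d[1]), (d[0] + 1, d[1]), (d[0], d[1] - 1), (d[0], d[1] + 1)]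
--
--
-- def _merge(clusters):
--     merged = []
--     rest = list(clusters)
--     while rest:
--         (per, grp), rest = rest[0], rest[1:]
--         gset = set(grp)  # maintained as set(grp) throughout
--         while True:
--             k = next((i for i, c in enumerate(rest) if not gset.isdisjoint(c[1])), None)
--             if k is None:
--                 break
--             p2, g2 = rest.pop(k)
--             per += p2
--             new = [x for x in g2 if x not in gset]
--             grp = grp + new
--             gset.update(new)
--         merged.append((per, grp))
--     return merged
--
--
-- def calculate_plants_groups(plants):
--     plants_groups = {}
--     for plant, regions in plants.items():
--         counts = {}
--         for cell in regions:
--             counts[(cell[0], cell[1])] = counts.get((cell[0], cell[1]), 0) + 1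
--         distinct = list(counts)
--         pairs = [(n, d) for d in distinct for n in _neighbors(d)]
--         adj = {}
--         for n, d in pairs:
--             adj[n] = adj.get(n, []) + [d]
--         clusters = []
--         for r, c in regions:
--             per = 4 - sum(counts.get(n, 0) for n in _neighbors((r, c)))
--             clusters.append((per, [(r, c)] + adj.get((r, c), [])))
--         merged = _merge(clusters)
--         plants_groups[plant] = ([p for p, _ in merged], [set(g) for _, g in merged])
--     return plants_groups
-- ===== Notes on version B (the rewrite author's own statement) =====
-- stated objective: alternative
-- what changed: B replaces A's per-cell scan over the whole region list (perimeter and neighbour collection by a quadratic inner loop) with a multiplicity counter and a precomputed adjacency index (hash maps built once per plant: perimeter = 4 - neighbour counts, each cell's neighbour group read off the index), and restructures the overlap-merge as a worklist that pops a cluster and repeatedly absorbs the first overlapping one.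
import Mathlib
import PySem

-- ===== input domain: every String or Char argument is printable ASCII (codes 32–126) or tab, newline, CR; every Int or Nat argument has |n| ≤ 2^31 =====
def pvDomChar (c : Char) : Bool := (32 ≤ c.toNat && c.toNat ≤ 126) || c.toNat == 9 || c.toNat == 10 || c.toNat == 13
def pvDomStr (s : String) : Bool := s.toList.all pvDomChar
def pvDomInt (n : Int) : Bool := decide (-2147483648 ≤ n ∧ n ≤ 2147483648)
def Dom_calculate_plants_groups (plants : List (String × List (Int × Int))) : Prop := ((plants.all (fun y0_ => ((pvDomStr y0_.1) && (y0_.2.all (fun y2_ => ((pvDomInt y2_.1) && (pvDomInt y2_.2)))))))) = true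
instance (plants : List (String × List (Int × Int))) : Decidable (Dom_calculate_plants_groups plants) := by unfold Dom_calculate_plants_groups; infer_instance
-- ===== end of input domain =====

-- B replaces A's quadratic per-cell neighbour scans by a multiplicity counter plus a
-- precomputed adjacency index (hash maps built once per plant), keeping the same
-- overlap-merge of the groups; objective: alternative.

-- ===== PORT A =====
-- Literal port of A.  The two parallel lists perimeters/groups that Python mutates in
-- lockstep (same indices, same deletions) are carried as one zipped list of pairs; the
-- in-place while loops over indices i / j (with `del` and restart j = i+1) are carried
-- as a zipper: `done` = entries before i, `skipped` = entries between i+1 and j, `rest`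
-- = entries from j on — every Python step is one recursion step on the same data.
def pvAPhase1 (regions : List (Int × Int)) : List Int × List (PySem.Set (Int × Int)) :=
  regions.foldl (fun acc region =>
    let st := regions.foldl (fun (st : Int × PySem.Set (Int × Int)) region2 =>
      if region.1 = region2.1 ∧ (region.2 - region2.2).natAbs = 1 ∨
         region.2 = region2.2 ∧ (region.1 - region2.1).natAbs = 1 then
        (st.1 - 1, st.2.add (region2.1, region2.2))
      else st) (4, PySem.Set.ofList [(region.1, region.2)])
    (acc.1 ++ [st.1], acc.2 ++ [st.2])) ([], [])

-- phase 2: the nested `while i < len(...)` / `while j < len(...)` loops, as one tail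
-- recursion over the zipper state; (pi, gi) is the entry at i, `skipped` the entries
-- scanned and found disjoint (between i+1 and j), `rest` the entries from j on
def pvAMerge (done : List (Int × PySem.Set (Int × Int))) (pi : Int)
    (gi : PySem.Set (Int × Int))
    (skipped rest : List (Int × PySem.Set (Int × Int))) :
    List (Int × PySem.Set (Int × Int)) :=
  match rest with
  | c :: rest' =>
    if !(PySem.Set.isdisjoint gi c.2) then
      pvAMerge done (pi + c.1) (PySem.Set.union gi c.2) [] (skipped ++ rest')
    else
      pvAMerge done pi gi (skipped ++ [c]) rest'
  | [] =>
    match skipped with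
    | [] => done ++ [(pi, gi)]
    | d :: rest2 => pvAMerge (done ++ [(pi, gi)]) d.1 d.2 [] rest2
termination_by (skipped.length + rest.length, rest.length)
decreasing_by
  · simp only [List.length_append, List.length_cons, List.length_nil]; omega
  · simp only [List.length_append, List.length_cons, List.length_nil]; omega
  · simp only [List.length_append, List.length_cons, List.length_nil]; omega

def pvAMergeStart (todo : List (Int × PySem.Set (Int × Int))) :
    List (Int × PySem.Set (Int × Int)) :=
  match todo with
  | [] => []
  | c :: rest => pvAMerge [] c.1 c.2 [] rest

def pvAMergePlant (v : List Int × List (PySem.Set (Int × Int))) :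
    List Int × List (List (Int × Int)) :=
  let merged := pvAMergeStart (v.1.zip v.2)
  (merged.map (·.1), merged.map (·.2))

def calculate_plants_groups (plants : List (String × List (Int × Int))) : List (String × List Int × (List (List (Int × Int)))) :=
  ((plants.foldl (fun d pr => d.insert pr.1 (pvAPhase1 pr.2)) PySem.Dict.empty).items).map
    (fun pr => (pr.1, pvAMergePlant pr.2))

-- ===== PORT B =====
def pvNbrs (d : Int × Int) : List (Int × Int) :=
  [(d.1 - 1, d.2), (d.1 + 1, d.2), (d.1, d.2 - 1), (d.1, d.2 + 1)]

-- _merge: the `while rest` / `while True` loops as one tail recursion; (per, grp) is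
-- the popped cluster being absorbed (gset = set(grp) in the Python is grp itself, a
-- PySem.Set); when no overlapping cluster remains it is emitted and the next one popped
def pvBLoop (merged : List (Int × List (Int × Int))) (per : Int)
    (grp : PySem.Set (Int × Int)) (rest : List (Int × List (Int × Int))) :
    List (Int × List (Int × Int)) :=
  match h : rest.findIdx? (fun c => !(PySem.Set.isdisjoint grp c.2)) with
  | some k =>
    pvBLoop merged (per + (rest.getD k (0, [])).1)
      (PySem.Set.union grp (rest.getD k (0, [])).2) (rest.eraseIdx k)
  | none =>
    match rest with
    | [] => merged ++ [(per, grp)]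
    | c :: rest' => pvBLoop (merged ++ [(per, grp)]) c.1 c.2 rest'
termination_by rest.length
decreasing_by
  · have hk := (List.findIdx?_eq_some_iff_findIdx_eq.mp h).1
    simp only [List.length_eraseIdx, hk, if_true]
    omega
  · simp only [List.length_cons]; omega

def pvBMergeStart (clusters : List (Int × List (Int × Int))) :
    List (Int × List (Int × Int)) :=
  match clusters with
  | [] => []
  | c :: rest => pvBLoop [] c.1 c.2 rest

def pvBPlant (regions : List (Int × Int)) : List Int × List (List (Int × Int)) :=
  let counts := regions.foldl
    (fun d cell => d.insert (cell.1, cell.2) (d.getD (cell.1, cell.2) 0 + 1)) PySem.Dict.empty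
  let distinct := counts.keys
  let pairs := distinct.flatMap (fun d => (pvNbrs d).map (fun n => (n, d)))
  let adj := pairs.foldl (fun m p => m.modify p.1 [] (· ++ [p.2])) PySem.Dict.empty
  let clusters := regions.foldl (fun acc c =>
      acc ++ [(4 - ((pvNbrs c).map (fun n => counts.getD n 0)).sum, c :: adj.getD c [])])
    ([] : List (Int × List (Int × Int)))
  let merged := pvBMergeStart clusters
  (merged.map (·.1), merged.map (fun pr => PySem.Set.ofList pr.2))

def calculate_plants_groups_alt (plants : List (String × List (Int × Int))) : List (String × List Int × (List (List (Int × Int)))) :=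
  (plants.foldl (fun d pr => d.insert pr.1 (pvBPlant pr.2)) PySem.Dict.empty).items

-- ===== PRECONDITION & SPEC =====
def Spec_calculate_plants_groups (plants : List (String × List (Int × Int))) (out : List (String × List Int × (List (List (Int × Int))))) : Prop := out = calculate_plants_groups_alt plants
instance (plants : List (String × List (Int × Int))) (out : List (String × List Int × (List (List (Int × Int))))) : Decidable (Spec_calculate_plants_groups plants out) := by unfold Spec_calculate_plants_groups; infer_instance

-- ===== CLAIM (what is proved, stated in full; the proofs are below) =====
def Claim_equal_calculate_plants_groups : Prop := ∀ (plants : List (String × List (Int × Int))), Dom_calculate_plants_groups plants → Spec_calculate_plants_groups plants (calculate_plants_groups plants)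

-- ===== LEMMAS AND PROOFS =====

-- A's adjacency test, as a Boolean predicate
def pvAdj (c d : Int × Int) : Bool :=
  decide (c.1 = d.1 ∧ (c.2 - d.2).natAbs = 1 ∨ c.2 = d.2 ∧ (c.1 - d.1).natAbs = 1)

theorem pvAdj_irrefl (c : Int × Int) : pvAdj c c = false := by
  obtain ⟨c1, c2⟩ := c; simp [pvAdj]

-- === phase-1 lemmas ===

-- the inner region2 fold of A
theorem pvA_inner_fold (c : Int × Int) (l : List (Int × Int)) (a : Int) (s : PySem.Set (Int × Int)) :
    l.foldl (fun (st : Int × PySem.Set (Int × Int)) region2 =>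
      if c.1 = region2.1 ∧ (c.2 - region2.2).natAbs = 1 ∨
         c.2 = region2.2 ∧ (c.1 - region2.1).natAbs = 1 then
        (st.1 - 1, st.2.add (region2.1, region2.2))
      else st) (a, s)
    = (a - (l.countP (fun d => pvAdj c d) : Int),
       s.update (l.filter (fun d => pvAdj c d))) := by
  induction l generalizing a s with
  | nil => simp
  | cons r2 l' ih =>
    by_cases h : c.1 = r2.1 ∧ (c.2 - r2.2).natAbs = 1 ∨ c.2 = r2.2 ∧ (c.1 - r2.1).natAbs = 1
    · have hd : pvAdj c r2 = true := by simpa [pvAdj] using h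
      simp only [List.foldl_cons, if_pos h, ih, List.countP_cons, List.filter_cons, hd,
        if_true, PySem.Set.update_cons, Prod.mk.eta]
      rw [Prod.mk.injEq]
      refine ⟨by push_cast; ring, rfl⟩
    · have hd : pvAdj c r2 = false := by simpa [pvAdj] using h
      simp only [List.foldl_cons, if_neg h, ih, List.countP_cons, List.filter_cons, hd]
      simp

theorem pvFoldl_pair_append {a b c : Type} (f : a -> b) (g : a -> c) (l : List a)
    (acc1 : List b) (acc2 : List c) :
    l.foldl (fun acc x => (acc.1 ++ [f x], acc.2 ++ [g x])) (acc1, acc2)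
      = (acc1 ++ l.map f, acc2 ++ l.map g) := by
  induction l generalizing acc1 acc2 with
  | nil => simp
  | cons x l ih => simp [ih]

-- A's phase 1 as two maps
theorem pvAPhase1_eq (R : List (Int × Int)) :
    pvAPhase1 R
      = (R.map (fun c => (4 : Int) - (R.countP (fun d => pvAdj c d) : Int)),
         R.map (fun c => PySem.Set.update [c] (R.filter (fun d => pvAdj c d)))) := by
  unfold pvAPhase1
  simp only [pvA_inner_fold, PySem.Set.ofList_cons, PySem.Set.ofList_nil, Prod.mk.eta]
  rw [pvFoldl_pair_append]
  simp [PySem.Set.discard]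

-- count of the four neighbours
theorem pvCountP_eq (c : Int × Int) (R : List (Int × Int)) :
    R.countP (fun d => pvAdj c d)
      = R.count (c.1 - 1, c.2) + R.count (c.1 + 1, c.2) + R.count (c.1, c.2 - 1) + R.count (c.1, c.2 + 1) := by
  induction R with
  | nil => simp
  | cons r R ih =>
    obtain ⟨r1, r2⟩ := r; obtain ⟨c1, c2⟩ := c
    simp only [List.countP_cons, List.count_cons, ih]
    simp only [pvAdj, beq_iff_eq, Prod.mk.injEq, decide_eq_true_eq]
    split_ifs <;> simp_all <;> omega

-- keep-first dedup commutes with filter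
theorem pvOfList_filter (p : (Int × Int) → Bool) (R : List (Int × Int)) :
    PySem.Set.ofList (R.filter p) = (PySem.Set.ofList R).filter p := by
  induction R using List.reverseRecOn with
  | nil => simp [PySem.Set.ofList_nil]
  | append_singleton R x ih =>
    rw [List.filter_append]
    by_cases hx : p x
    · simp only [hx, List.filter_cons, List.filter_nil, if_true,
        PySem.Set.ofList_append_singleton, ih, PySem.Set.add_eq_ite]
      by_cases hm : x ∈ PySem.Set.ofList R
      · have hmf : x ∈ (PySem.Set.ofList R).filter p := List.mem_filter.mpr ⟨hm, hx⟩
        simp [hm, hmf]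
      · have hmf : x ∉ (PySem.Set.ofList R).filter p := fun hc => hm (List.mem_filter.mp hc).1
        simp [hm, hmf, List.filter_append, hx]
    · simp only [hx, List.filter_cons, List.filter_nil, if_false, List.append_nil, ih,
        PySem.Set.ofList_append_singleton, PySem.Set.add_eq_ite]
      by_cases hm : x ∈ PySem.Set.ofList R
      · simp [hm]; exact ih
      · simp [hm, List.filter_append, hx]; exact ih

-- A's per-cell group
theorem pvGroup_eq (c : Int × Int) (R : List (Int × Int)) :
    PySem.Set.update [c] (R.filter (fun d => pvAdj c d))
      = c :: (PySem.Set.ofList R).filter (fun d => pvAdj c d) := by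
  rw [PySem.Set.update_eq_append_filter, pvOfList_filter]
  have : ∀ y ∈ ((PySem.Set.ofList R).filter (fun d => pvAdj c d)),
      (!PySem.Set.contains [c] y) = true := by
    intro y hy
    have hadj : pvAdj c y = true := (List.mem_filter.mp hy).2
    have hne : y ≠ c := fun he => by rw [he, pvAdj_irrefl] at hadj; exact absurd hadj (by simp)

    simp [PySem.Set.contains, hne]
  rw [List.filter_eq_self.mpr this]
  rfl

-- B's adjacency index lookup
theorem pvAdjIndex_getD (D : List (Int × Int)) (c : Int × Int) :
    ((D.flatMap (fun d => (pvNbrs d).map (fun n => (n, d)))).foldl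
        (fun m p => m.modify p.1 [] (· ++ [p.2])) PySem.Dict.empty).getD c []
      = D.filter (fun d => pvAdj c d) := by
  rw [PySem.Dict.getD_foldl_modify_append]
  rw [PySem.Dict.getD_empty]
  simp only [List.nil_append]
  induction D with
  | nil => simp
  | cons d D ih =>
    rw [List.flatMap_cons, List.filter_append, List.map_append, ih, List.filter_cons]
    have hhead : List.map (fun x => x.2)
        (List.filter (fun p => p.1 == c) ((pvNbrs d).map (fun n => (n, d))))
        = if pvAdj c d = true then [d] else [] := by
      obtain ⟨d1, d2⟩ := d; obtain ⟨c1, c2⟩ := c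
      simp only [pvNbrs, List.map_cons, List.map_nil, List.filter_cons, List.filter_nil,
        beq_iff_eq, Prod.mk.injEq, pvAdj, decide_eq_true_eq]
      split_ifs <;> simp_all <;> omega
    rw [hhead]
    split_ifs <;> simp

-- === merge lemmas ===

theorem pvBLoop_eq_some (merged : List (Int × List (Int × Int))) (per : Int)
    (grp : PySem.Set (Int × Int)) (rest : List (Int × List (Int × Int))) (k : Nat)
    (h : rest.findIdx? (fun c => !(PySem.Set.isdisjoint grp c.2)) = some k) :
    pvBLoop merged per grp rest
      = pvBLoop merged (per + (rest.getD k (0, [])).1)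
          (PySem.Set.union grp (rest.getD k (0, [])).2) (rest.eraseIdx k) := by
  rw [pvBLoop]
  split <;> simp_all

theorem pvBLoop_nil (merged : List (Int × List (Int × Int))) (per : Int)
    (grp : PySem.Set (Int × Int)) :
    pvBLoop merged per grp [] = merged ++ [(per, grp)] := by
  rw [pvBLoop]
  rfl

theorem pvBLoop_none_cons (merged : List (Int × List (Int × Int))) (per : Int)
    (grp : PySem.Set (Int × Int)) (c : Int × List (Int × Int))
    (rest' : List (Int × List (Int × Int)))
    (h : (c :: rest').findIdx? (fun c => !(PySem.Set.isdisjoint grp c.2)) = none) :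
    pvBLoop merged per grp (c :: rest') = pvBLoop (merged ++ [(per, grp)]) c.1 c.2 rest' := by
  rw [pvBLoop]
  split <;> simp_all

theorem pvFindIdx?_prefix (p : (Int × PySem.Set (Int × Int)) → Bool)
    (sk : List (Int × PySem.Set (Int × Int))) (c) (r) (h : ∀ x ∈ sk, p x = false) (hc : p c = true) :
    (sk ++ c :: r).findIdx? p = some sk.length := by
  rw [List.findIdx?_append, List.findIdx?_eq_none_iff.mpr h, List.findIdx?_cons, if_pos hc]
  simp

theorem pvEraseIdx_middle {α : Type} (sk : List α) (c : α) (r : List α) :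
    (sk ++ c :: r).eraseIdx sk.length = sk ++ r := by
  induction sk with
  | nil => simp
  | cons a sk ih => simp [ih]

theorem pvAMerge_eq_pvBLoop (done : List (Int × PySem.Set (Int × Int))) (pi : Int)
    (gi : PySem.Set (Int × Int)) (skipped rest : List (Int × PySem.Set (Int × Int)))
    (h : ∀ x ∈ skipped, PySem.Set.isdisjoint gi x.2 = true) :
    pvAMerge done pi gi skipped rest = pvBLoop done pi gi (skipped ++ rest) := by
  fun_induction pvAMerge with
  | case1 done pi gi skipped c rest' hcond ih =>
    have hsk : ∀ x ∈ skipped, (fun c : Int × PySem.Set (Int × Int) => !(PySem.Set.isdisjoint gi c.2)) x = false := by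
      intro x hx; simp [h x hx]
    rw [pvBLoop_eq_some done pi gi _ skipped.length (pvFindIdx?_prefix _ _ _ _ hsk hcond)]
    have hget : (skipped ++ c :: rest').getD skipped.length (0, []) = c := by
      rw [List.getD_eq_getElem?_getD, List.getElem?_append_right (le_refl _)]
      simp
    rw [hget, pvEraseIdx_middle]
    exact ih (by simp)
  | case2 done pi gi skipped c rest' hcond ih =>
    have hinv : ∀ x ∈ skipped ++ [c], PySem.Set.isdisjoint gi x.2 = true := by
      intro x hx
      rcases List.mem_append.mp hx with h1 | h1
      · exact h x h1
      · simp only [List.mem_singleton] at h1; subst h1; simpa using hcond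
    rw [ih hinv]
    congr 1
    simp
  | case3 done pi gi => rw [List.append_nil, pvBLoop_nil]
  | case4 done pi gi d rest2 ih =>
    rw [List.append_nil]
    have hnone : (d :: rest2).findIdx? (fun c => !(PySem.Set.isdisjoint gi c.2)) = none := by
      refine List.findIdx?_eq_none_iff.mpr ?_
      intro x hx
      simp [h x hx]
    rw [pvBLoop_none_cons _ _ _ _ _ hnone]
    simpa using ih (by simp)

-- === nodup lemmas (set(g) = g on the merged groups) ===

theorem pvBLoop_nodup (merged : List (Int × List (Int × Int))) (per : Int)
    (grp : PySem.Set (Int × Int)) (rest : List (Int × List (Int × Int)))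
    (hm : ∀ pr ∈ merged, pr.2.Nodup) (hg : grp.Nodup)
    (hr : ∀ cl ∈ rest, cl.2.Nodup) :
    ∀ pr ∈ pvBLoop merged per grp rest, pr.2.Nodup := by
  fun_induction pvBLoop with
  | case1 merged per grp rest k hfind ih =>
    exact ih hm (PySem.Set.nodup_union _ _ hg)
      (fun cl hcl => hr cl ((List.eraseIdx_sublist rest k).mem hcl))
  | case2 merged per grp hfind =>
    intro pr hpr
    rcases List.mem_append.mp hpr with hin | hin
    · exact hm pr hin
    · simp only [List.mem_singleton] at hin; subst hin; exact hg
  | case3 merged per grp c rest' hfind ih =>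
    refine ih ?_ (hr c (by simp)) (fun cl hcl => hr cl (List.mem_cons_of_mem _ hcl))
    intro pr hpr
    rcases List.mem_append.mp hpr with hin | hin
    · exact hm pr hin
    · simp only [List.mem_singleton] at hin; subst hin; exact hg

theorem pvBMergeStart_nodup (clusters : List (Int × List (Int × Int)))
    (h : ∀ cl ∈ clusters, cl.2.Nodup) :
    ∀ pr ∈ pvBMergeStart clusters, pr.2.Nodup := by
  cases clusters with
  | nil => simp [pvBMergeStart]
  | cons c rest =>
    exact pvBLoop_nodup [] c.1 c.2 rest (by simp) (h c (by simp))
      (fun cl hcl => h cl (List.mem_cons_of_mem _ hcl))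

theorem pvAMergeStart_eq (todo : List (Int × PySem.Set (Int × Int))) :
    pvAMergeStart todo = pvBMergeStart todo := by
  cases todo with
  | nil => rfl
  | cons c rest =>
    show pvAMerge [] c.1 c.2 [] rest = _
    rw [pvAMerge_eq_pvBLoop [] c.1 c.2 [] rest (by simp), List.nil_append]
    rfl

-- === per-plant equality ===

theorem pvPlant_eq (R : List (Int × Int)) : pvAMergePlant (pvAPhase1 R) = pvBPlant R := by
  have hcfun : (fun (d : PySem.Dict (Int × Int) Int) (cell : Int × Int) =>
      d.insert (cell.1, cell.2) (d.getD (cell.1, cell.2) 0 + 1))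
      = (fun d x => d.insert x (d.getD x 0 + 1)) := by
    funext d x; simp
  simp only [pvAMergePlant, pvBPlant, hcfun, PySem.Dict.foldl_insert_getD_add_one_eq_counter,
    PySem.Dict.keys_counter, PySem.List.foldl_append_singleton_eq_map, List.nil_append,
    pvAdjIndex_getD]
  rw [pvAPhase1_eq]
  simp only [List.zip_map']
  rw [pvAMergeStart_eq]
  have hfun : (fun c : Int × Int => ((4 : Int) - (R.countP (fun d => pvAdj c d) : Int),
        PySem.Set.update [c] (R.filter (fun d => pvAdj c d))))
      = (fun c : Int × Int =>
        ((4 : Int) - ((pvNbrs c).map (fun n => (PySem.Dict.counter R).getD n 0)).sum,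
         c :: (PySem.Set.ofList R).filter (fun d => pvAdj c d))) := by
    funext c
    rw [Prod.mk.injEq]
    constructor
    · simp only [pvNbrs, List.map_cons, List.map_nil, List.sum_cons, List.sum_nil,
        PySem.Dict.getD_counter, pvCountP_eq]
      push_cast; ring
    · exact pvGroup_eq c R
  rw [hfun]
  have hnodup : ∀ pr ∈ pvBMergeStart (R.map (fun c =>
      ((4 : Int) - ((pvNbrs c).map (fun n => (PySem.Dict.counter R).getD n 0)).sum,
       c :: (PySem.Set.ofList R).filter (fun d => pvAdj c d)))), pr.2.Nodup := by
    refine pvBMergeStart_nodup _ ?_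
    intro cl hcl
    obtain ⟨c, _, rfl⟩ := List.mem_map.mp hcl
    refine List.Nodup.cons ?_ ((PySem.Set.nodup_ofList R).filter _)
    intro hmem
    have := (List.mem_filter.mp hmem).2
    rw [pvAdj_irrefl] at this
    exact absurd this (by simp)
  rw [Prod.mk.injEq]
  refine ⟨rfl, List.map_congr_left ?_⟩
  intro pr hpr
  exact (PySem.Set.ofList_eq_self_of_nodup _ (hnodup pr hpr)).symm

-- === dict plumbing ===

theorem pvItems_insert_map {V1 V2 : Type} (m : V1 → V2)
    (d1 : PySem.Dict String V1) (d2 : PySem.Dict String V2)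
    (h : d2.items = d1.items.map (fun p => (p.1, m p.2))) (k : String) (v : V1) :
    (d2.insert k (m v)).items = (d1.insert k v).items.map (fun p => (p.1, m p.2)) := by
  have hkeys : d2.keys = d1.keys := by
    show d2.items.map Prod.fst = d1.items.map Prod.fst
    rw [h, List.map_map]
    rfl
  have hcont : d2.contains k = d1.contains k := by
    rw [PySem.Dict.contains_eq_decide_mem_keys, PySem.Dict.contains_eq_decide_mem_keys, hkeys]
  rw [PySem.Dict.items_insert, PySem.Dict.items_insert, hcont]
  by_cases hc : d1.contains k = true
  · rw [if_pos hc, if_pos hc, h, List.map_map, List.map_map]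
    refine List.map_congr_left ?_
    intro p _
    by_cases hpk : p.1 = k <;> simp [hpk]
  · rw [if_neg hc, if_neg hc, h, List.map_append]
    rfl

theorem pvDict_fold_items {V1 V2 : Type} (F : List (Int × Int) → V1) (m : V1 → V2)
    (plants : List (String × List (Int × Int)))
    (d1 : PySem.Dict String V1) (d2 : PySem.Dict String V2)
    (h : d2.items = d1.items.map (fun p => (p.1, m p.2))) :
    (plants.foldl (fun d pr => d.insert pr.1 (m (F pr.2))) d2).items
      = (plants.foldl (fun d pr => d.insert pr.1 (F pr.2)) d1).items.map (fun p => (p.1, m p.2)) := by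
  induction plants generalizing d1 d2 with
  | nil => simpa using h
  | cons pr plants ih =>
    simp only [List.foldl_cons]
    exact ih _ _ (pvItems_insert_map m d1 d2 h pr.1 (F pr.2))

-- ===== VERDICT (by name: the statement is the Claim_ definition above) =====
theorem calculate_plants_groups_spec : Claim_equal_calculate_plants_groups := by
  intro plants _
  unfold Spec_calculate_plants_groups calculate_plants_groups calculate_plants_groups_alt
  have hfun : (fun (d : PySem.Dict String (List Int × List (List (Int × Int)))) (pr : String × List (Int × Int)) => d.insert pr.1 (pvBPlant pr.2))
      = (fun d pr => d.insert pr.1 (pvAMergePlant (pvAPhase1 pr.2))) := by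
    funext d pr; rw [pvPlant_eq]
  rw [hfun]
  rw [pvDict_fold_items pvAPhase1 pvAMergePlant plants PySem.Dict.empty PySem.Dict.empty (by rfl)]
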